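-- pv_equiv track=rewrite | github.com/DiegoNavaArsola/practica_4_vision | practica_filtros/filtros_funciones.py | second_derivate
-- ===== SOURCE A (Python) =====
-- def pascal_triangle(n):
--     """
--     :param n: Nivel del triángulo
--     :return: Lista con los coeficientes presentes en el nivel n del triángulo de pascal
--     """
--
--     triangle = []
--     if n <= 0:
--         return [1]
--     else:
--         for i in range(n):
--                 row = [None for element in range(i + 1)]
--                 row[0], row[-1] = 1, 1
--                 for j in range(1, i):
--                     row[j] = triangle[i-1][j-1] + triangle[i-1][j]
--                 triangle.append(row)
--         return triangle[-1]
--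
-- def first_derivate(n):
--     """
--     :param n: Nivel del triángulo
--     :return: Lista los coeficientes presentes en el triángulo derivado de pascal en el nivel n
--     """
--
--     inv_triangle = []
--     if n > 0:
--         row_pascal = pascal_triangle(n)
--
--         inverse_row_pascal = [-1 * element for element in row_pascal]
--         inverse_row_pascal.insert(0,0)
--
--         row_pascal.append(0)
--
--         for i in range(len(row_pascal)):
--             inv_triangle.append(row_pascal[i] + inverse_row_pascal[i])
--
--         return inv_triangle
--
--     else:
--         return [1]
--
-- def second_derivate(n):
--     """
--     :param n: Nivel del triángulo
--     :return: Lista los coeficientes presentes en el triángulo derivado de pascal en el nivel n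
--     """
--
--     inv_triangle = []
--     if n > 0:
--         row_pascal = first_derivate(n)
--
--         inverse_row_pascal = [-1 * element for element in row_pascal]
--         inverse_row_pascal.insert(0,0)
--
--         row_pascal.append(0)
--
--         for i in range(len(row_pascal)):
--             inv_triangle.append(row_pascal[i] + inverse_row_pascal[i])
--
--         return inv_triangle
--
--     else:
--         return [1]
-- ===== SOURCE B (Python) =====
-- def second_derivate(n):
--     """Second finite difference of Pascal row n, computed in O(n):
--     the binomial row C(n-1, k) via the multiplicative recurrence, then
--     result[i] = C(n-1,i) - 2*C(n-1,i-1) + C(n-1,i-2) with out-of-range terms 0."""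
--     if n <= 0:
--         return [1]
--     m = n - 1
--     row = [1]
--     c = 1
--     for k in range(m):
--         c = c * (m - k) // (k + 1)
--         row.append(c)
--     def p(k):
--         return row[k] if 0 <= k < len(row) else 0
--     return [p(i) - 2 * p(i - 1) + p(i - 2) for i in range(n + 2)]
-- ===== Notes on version B (the rewrite author's own statement) =====
-- stated objective: faster
-- what changed: B replaces A's O(n^2) construction of the whole Pascal triangle (plus two explicit differencing passes over lists) by computing the single binomial row C(n-1,k) in O(n) with the multiplicative recurrence and reading the second difference off directly as C(n-1,i) - 2C(n-1,i-1) + C(n-1,i-2).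
import Mathlib
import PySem

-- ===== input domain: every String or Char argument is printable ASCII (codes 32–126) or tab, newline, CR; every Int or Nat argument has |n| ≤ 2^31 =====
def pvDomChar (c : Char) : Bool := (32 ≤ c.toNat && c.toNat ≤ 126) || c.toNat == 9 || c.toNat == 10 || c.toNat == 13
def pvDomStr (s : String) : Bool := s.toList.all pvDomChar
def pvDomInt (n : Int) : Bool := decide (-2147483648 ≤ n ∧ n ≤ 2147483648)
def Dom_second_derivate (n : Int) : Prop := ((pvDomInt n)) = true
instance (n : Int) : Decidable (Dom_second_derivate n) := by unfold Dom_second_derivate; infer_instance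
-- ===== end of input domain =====

-- B computes the binomial row C(n-1,k) in O(n) by the multiplicative recurrence and reads the
-- second difference off directly, instead of A's O(n^2) Pascal-triangle construction; the timing
-- run measured B faster (asymptotic O(n) vs O(n^2)).

-- ===== PORT A =====
-- Python's mutable row '[None for _ in range(i+1)]' is modelled as a List Int initialised with a
-- 0 placeholder: exact, because every entry (row[0], row[-1], row[j] for j in range(1,i)) is
-- overwritten before the row is ever read, so the placeholder value is never observed.
def pvRowA (triangle : List (List Int)) (i : Int) : List Int :=
  let row : List Int := (PySem.List.pyRange 0 (i + 1) 1).map (fun _ => 0)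
  let row := PySem.List.pySetD row 0 1
  let row := PySem.List.pySetD row (-1) 1
  (PySem.List.pyRange 1 i 1).foldl
    (fun row j =>
      PySem.List.pySetD row j
        (PySem.List.pyGetD (PySem.List.pyGetD triangle (i - 1) []) (j - 1) 0 +
         PySem.List.pyGetD (PySem.List.pyGetD triangle (i - 1) []) j 0)) row

def pascal_triangle (n : Int) : List Int :=
  if n ≤ 0 then [1]
  else
    let triangle := (PySem.List.pyRange 0 n 1).foldl
      (fun triangle i => triangle ++ [pvRowA triangle i]) ([] : List (List Int))
    PySem.List.pyGetD triangle (-1) []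

def first_derivate (n : Int) : List Int :=
  if n > 0 then
    let row_pascal := pascal_triangle n
    let inverse_row_pascal := PySem.List.insert (row_pascal.map (fun e => -1 * e)) 0 0
    let row_pascal := row_pascal ++ [0]
    (PySem.List.pyRange 0 (PySem.List.len row_pascal) 1).foldl
      (fun acc i =>
        acc ++ [PySem.List.pyGetD row_pascal i 0 + PySem.List.pyGetD inverse_row_pascal i 0]) []
  else [1]

def second_derivate (n : Int) : List Int :=
  if n > 0 then
    let row_pascal := first_derivate n
    let inverse_row_pascal := PySem.List.insert (row_pascal.map (fun e => -1 * e)) 0 0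
    let row_pascal := row_pascal ++ [0]
    (PySem.List.pyRange 0 (PySem.List.len row_pascal) 1).foldl
      (fun acc i =>
        acc ++ [PySem.List.pyGetD row_pascal i 0 + PySem.List.pyGetD inverse_row_pascal i 0]) []
  else [1]

-- ===== PORT B =====
-- transcription of Source B's local 'p': row[k] if 0 <= k < len(row) else 0
def pvPad (row : List Int) (k : Int) : Int :=
  if 0 ≤ k ∧ k < (row.length : Int) then PySem.List.pyGetD row k 0 else 0

def second_derivate_alt (n : Int) : List Int :=
  if n ≤ 0 then [1]
  else
    let m := n - 1
    let s := (PySem.List.pyRange 0 m 1).foldl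
      (fun (s : List Int × Int) k =>
        let c := PySem.Int.floordiv (s.2 * (m - k)) (k + 1)
        (s.1 ++ [c], c)) ([1], 1)
    let row := s.1
    (PySem.List.pyRange 0 (n + 2) 1).map
      (fun i => pvPad row i - 2 * pvPad row (i - 1) + pvPad row (i - 2))

-- ===== PRECONDITION & SPEC =====
def Spec_second_derivate (n : Int) (out : List Int) : Prop := out = second_derivate_alt n
instance (n : Int) (out : List Int) : Decidable (Spec_second_derivate n out) := by unfold Spec_second_derivate; infer_instance

-- ===== CLAIM (what is proved, stated in full; the proofs are below) =====
def Claim_equal_second_derivate : Prop := ∀ (n : Int), Dom_second_derivate n → Spec_second_derivate n (second_derivate n)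

-- ===== LEMMAS AND PROOFS =====

-- the binomial row: the value pascal_triangle computes for level m+1
def pvBinRow (m : Nat) : List Int := (List.range (m + 1)).map (fun k => (m.choose k : Int))

theorem pvBinRow_length (m : Nat) : (pvBinRow m).length = m + 1 := by
  simp [pvBinRow]

theorem pvPad_natCast (xs : List Int) (k : Nat) : pvPad xs (k : Int) = xs.getD k 0 := by
  by_cases h : k < xs.length
  · simp [pvPad, h, List.getD_eq_getElem?_getD]
  · simp [pvPad, h, List.getD_eq_getElem?_getD]

theorem pvPad_neg (xs : List Int) (i : Int) (h : i < 0) : pvPad xs i = 0 := by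
  simp [pvPad]; omega

theorem pvPad_ge (xs : List Int) (i : Int) (h : (xs.length : Int) ≤ i) : pvPad xs i = 0 := by
  simp [pvPad]; omega

-- pySetD at index -1 writes the last cell
theorem pvSetD_neg_one {α : Type} (xs : List α) (v : α) (h : xs ≠ []) :
    PySem.List.pySetD xs (-1) v = xs.set (xs.length - 1) v := by
  have hl : 0 < xs.length := List.length_pos_iff.mpr h
  simp only [PySem.List.pySetD, PySem.List.pySet?, PySem.List.pyIdx?]
  rw [if_neg (by omega), if_pos (by omega)]
  simp

theorem pvLength_foldl_set {α : Type} (f : Int → α) (l : List Int) (xs : List α) :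
    (l.foldl (fun r j => PySem.List.pySetD r j (f j)) xs).length = xs.length := by
  induction l generalizing xs with
  | nil => rfl
  | cons a l ih => simp [List.foldl_cons, ih, PySem.List.length_pySetD]

theorem pvFoldl_set_getElem? {α : Type} (f : Int → α) (b : Nat) :
    ∀ (a : Nat) (xs : List α) (k : Nat),
      ((PySem.List.pyRange a b 1).foldl (fun r j => PySem.List.pySetD r j (f j)) xs)[k]? =
        if a ≤ k ∧ k < b ∧ k < xs.length then some (f k) else xs[k]? := by
  induction b with
  | zero =>
    intro a xs k
    rw [PySem.List.pyRange_one_eq_nil (by omega)]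
    simp only [List.foldl_nil]
    rw [if_neg (by omega)]
  | succ b ih =>
    intro a xs k
    by_cases hab : a ≤ b
    · rw [show ((b + 1 : Nat) : Int) = (b : Int) + 1 by push_cast; ring,
        PySem.List.pyRange_one_succ_right (by exact_mod_cast hab),
        List.foldl_append]
      simp only [List.foldl_cons, List.foldl_nil]
      rw [PySem.List.pySetD_natCast, List.getElem?_set]
      rw [pvLength_foldl_set, ih a xs k]
      by_cases hkb : k = b
      · subst hkb
        by_cases hkl : k < xs.length <;> simp [hkl] <;> omega
      · rw [if_neg (fun h => hkb h.symm)]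
        split_ifs with h1 h2
        · rfl
        · omega
        · omega
        · rfl
    · rw [PySem.List.pyRange_one_eq_nil (by push_cast; omega)]
      simp only [List.foldl_nil]
      rw [if_neg (by omega)]

theorem pvRowA_zero (T : List (List Int)) : pvRowA T 0 = [1] := by
  simp [pvRowA, PySem.List.pyRange_one_eq_nil]
  decide

theorem pvRowA_succ (T : List (List Int)) (i : Nat) (hi : 1 ≤ i)
    (hprev : PySem.List.pyGetD T ((i : Int) - 1) [] = pvBinRow (i - 1)) :
    pvRowA T (i : Int) = pvBinRow i := by
  have hrow0 : ((PySem.List.pyRange 0 ((i : Int) + 1) 1).map (fun _ => (0 : Int))) =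
      List.replicate (i + 1) 0 := by
    rw [show ((i : Int) + 1) = ((i + 1 : Nat) : Int) by push_cast; ring,
      PySem.List.pyRange_zero_nat]
    apply List.eq_replicate_iff.mpr
    constructor
    · simp
    · intro b hb
      simp at hb
      exact hb.2.symm
  rw [show pvRowA T (i : Int) = (PySem.List.pyRange 1 (i : Int) 1).foldl
      (fun row j => PySem.List.pySetD row j
        (PySem.List.pyGetD (PySem.List.pyGetD T ((i : Int) - 1) []) (j - 1) 0 +
         PySem.List.pyGetD (PySem.List.pyGetD T ((i : Int) - 1) []) j 0))
      (PySem.List.pySetD (PySem.List.pySetD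
        (((PySem.List.pyRange 0 ((i : Int) + 1) 1).map (fun _ => (0 : Int)))) 0 1) (-1) 1) from rfl]
  rw [hprev, hrow0]
  have h01 : PySem.List.pySetD (List.replicate (i + 1) (0 : Int)) 0 1 =
      (List.replicate (i + 1) (0 : Int)).set 0 1 := by
    simp [PySem.List.pySetD, PySem.List.pySet?, PySem.List.pyIdx?]
  rw [h01]
  have hne : ((List.replicate (i + 1) (0 : Int)).set 0 1) ≠ [] := by
    simp
  rw [pvSetD_neg_one _ _ hne]
  apply List.ext_getElem?
  intro k
  have hfold := pvFoldl_set_getElem?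
    (fun j => PySem.List.pyGetD (pvBinRow (i - 1)) (j - 1) 0 +
      PySem.List.pyGetD (pvBinRow (i - 1)) j 0) i 1
    (((List.replicate (i + 1) (0 : Int)).set 0 1).set
      ((((List.replicate (i + 1) (0 : Int)).set 0 1)).length - 1) 1) k
  push_cast at hfold
  rw [hfold]
  have hbl : (((List.replicate (i + 1) (0 : Int)).set 0 1)).length = i + 1 := by
    simp
  have hbin : (pvBinRow i)[k]? = if k < i + 1 then some ((i.choose k : Int)) else none := by
    by_cases hk : k < i + 1
    · simp [pvBinRow, hk]
    · rw [List.getElem?_eq_none (by simp [pvBinRow]; omega), if_neg hk]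
  rw [hbin, hbl]
  by_cases hmid : 1 ≤ k ∧ k < i
  · rw [if_pos ⟨hmid.1, hmid.2, by simp; omega⟩, if_pos (by omega)]
    obtain ⟨hk1, hki⟩ := hmid
    congr 1
    rw [show ((k : Int) - 1) = ((k - 1 : Nat) : Int) by omega]
    rw [PySem.List.pyGetD_natCast, PySem.List.pyGetD_natCast]
    have h1 : (pvBinRow (i - 1)).getD (k - 1) 0 = ((i - 1).choose (k - 1) : Int) := by
      simp [pvBinRow, List.getD_eq_getElem?_getD, List.getElem?_map,
        List.getElem?_range (by omega : k - 1 < i - 1 + 1)]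
    have h2 : (pvBinRow (i - 1)).getD k 0 = ((i - 1).choose k : Int) := by
      simp [pvBinRow, List.getD_eq_getElem?_getD, List.getElem?_map,
        List.getElem?_range (by omega : k < i - 1 + 1)]
    rw [h1, h2]
    obtain ⟨I, rfl⟩ : ∃ I, i = I + 1 := ⟨i - 1, by omega⟩
    obtain ⟨K, rfl⟩ : ∃ K, k = K + 1 := ⟨k - 1, by omega⟩
    simp only [Nat.add_sub_cancel]
    rw [Nat.choose_succ_succ]
    push_cast
    ring
  · rw [if_neg (by omega)]
    rw [List.getElem?_set, List.getElem?_set]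
    simp only [hbl, List.length_replicate, List.getElem?_replicate]
    by_cases hk0 : k = 0
    · subst hk0
      simp [Nat.choose_zero_right]
    · by_cases hki : k = i
      · subst hki
        rw [if_pos (by omega), if_pos (by omega), if_pos (by omega)]
        simp [Nat.choose_self]
      · rw [if_neg (by omega), if_neg (Ne.symm hk0)]
        rw [if_neg (by omega), if_neg (by omega)]

theorem pvTriangle (N : Nat) :
    (PySem.List.pyRange 0 (N : Int) 1).foldl
        (fun triangle i => triangle ++ [pvRowA triangle i]) ([] : List (List Int)) =
      (List.range N).map pvBinRow := by
  induction N with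
  | zero => simp [PySem.List.pyRange_one_eq_nil]
  | succ N ih =>
    rw [show ((N + 1 : Nat) : Int) = (N : Int) + 1 by push_cast; ring,
      PySem.List.pyRange_one_succ_right (by positivity), List.foldl_append, ih]
    simp only [List.foldl_cons, List.foldl_nil, List.range_succ, List.map_append, List.map_cons,
      List.map_nil]
    congr 1
    by_cases hN : N = 0
    · subst hN; simp [pvRowA_zero, pvBinRow]
    · rw [pvRowA_succ _ N (by omega)]
      rw [show ((N : Int) - 1) = ((N - 1 : Nat) : Int) by omega]
      rw [PySem.List.pyGetD_natCast]
      rw [List.getD_eq_getElem?_getD]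
      simp [List.getElem?_map, List.getElem?_range (by omega : N - 1 < N)]

theorem pvPascal (N : Nat) (h : 1 ≤ N) : pascal_triangle (N : Int) = pvBinRow (N - 1) := by
  rw [pascal_triangle, if_neg (by omega), pvTriangle]
  rw [show (List.range N).map pvBinRow = (List.range (N - 1)).map pvBinRow ++ [pvBinRow (N - 1)] by
    conv_lhs => rw [show N = (N - 1) + 1 by omega]
    rw [List.range_succ]; simp]
  exact PySem.List.pyGetD_neg_one_append_singleton _ _ _

-- the shared shape of first_derivate / second_derivate's differencing loop
theorem pvGetD_append_zero (xs : List Int) (k : Nat) : (xs ++ [0]).getD k 0 = xs.getD k 0 := by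
  rcases lt_trichotomy k xs.length with h | h | h
  · rw [List.getD_eq_getElem?_getD, List.getD_eq_getElem?_getD, List.getElem?_append_left h]
  · subst h
    simp [List.getD_eq_getElem?_getD]
  · rw [List.getD_eq_getElem?_getD, List.getD_eq_getElem?_getD,
      List.getElem?_eq_none (by simp; omega), List.getElem?_eq_none (by omega)]

theorem pvGetD_map_neg (xs : List Int) (k : Nat) :
    (xs.map (fun e => -1 * e)).getD k 0 = -1 * xs.getD k 0 := by
  by_cases h : k < xs.length
  · rw [List.getD_eq_getElem?_getD, List.getD_eq_getElem?_getD, List.getElem?_map,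
      List.getElem?_eq_getElem h]
    rfl
  · rw [List.getD_eq_getElem?_getD, List.getD_eq_getElem?_getD,
      List.getElem?_eq_none (by simp; omega), List.getElem?_eq_none (by omega)]
    simp

theorem pvDiffShape (xs : List Int) :
    (PySem.List.pyRange 0 (PySem.List.len (xs ++ [0])) 1).foldl
        (fun acc i =>
          acc ++ [PySem.List.pyGetD (xs ++ [0]) i 0 +
            PySem.List.pyGetD (PySem.List.insert (xs.map (fun e => -1 * e)) 0 0) i 0]) [] =
      (List.range (xs.length + 1)).map (fun (k : Nat) => pvPad xs (k : Int) - pvPad xs ((k : Int) - 1)) := by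
  rw [PySem.List.insert_zero, PySem.List.foldl_append_singleton_eq_map]
  have hlen : PySem.List.len (xs ++ [0]) = ((xs.length + 1 : Nat) : Int) := by
    simp [PySem.List.len_eq]
  rw [hlen, PySem.List.pyRange_zero_nat, List.map_map, List.nil_append]
  apply List.map_congr_left
  intro k hk
  simp only [Function.comp_apply]
  rw [PySem.List.pyGetD_natCast, PySem.List.pyGetD_natCast, pvGetD_append_zero, pvPad_natCast]
  cases k with
  | zero => simp [pvPad_neg xs (-1) (by norm_num)]
  | succ K =>
    rw [List.getD_cons_succ, pvGetD_map_neg,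
      show (((K + 1 : Nat) : Int) - 1) = ((K : Nat) : Int) by push_cast; ring, pvPad_natCast]
    ring

theorem pvPad_diff (R : List Int)
    (F : List Int) (hF : F = (List.range (R.length + 1)).map
      (fun (k : Nat) => pvPad R (k : Int) - pvPad R ((k : Int) - 1))) (i : Int) :
    pvPad F i = pvPad R i - pvPad R (i - 1) := by
  subst hF
  by_cases hi : i < 0
  · rw [pvPad_neg _ _ hi, pvPad_neg _ _ hi, pvPad_neg _ _ (by omega)]
    ring
  · obtain ⟨k, rfl⟩ : ∃ k : Nat, i = (k : Int) := ⟨i.toNat, by omega⟩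
    by_cases hk : k < R.length + 1
    · rw [pvPad_natCast, List.getD_eq_getElem?_getD, List.getElem?_map, List.getElem?_range hk]
      simp
    · rw [pvPad_natCast, List.getD_eq_getElem?_getD, List.getElem?_eq_none (by simp; omega),
        pvPad_ge _ _ (by omega), pvPad_ge _ _ (by omega)]
      simp

theorem pvBRow (M : Nat) (k : Nat) (hk : k ≤ M) :
    (PySem.List.pyRange 0 (k : Int) 1).foldl
        (fun (s : List Int × Int) j =>
          let c := PySem.Int.floordiv (s.2 * ((M : Int) - j)) (j + 1)
          (s.1 ++ [c], c)) ([1], 1) =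
      ((List.range (k + 1)).map (fun j => (M.choose j : Int)), (M.choose k : Int)) := by
  induction k with
  | zero => simp [PySem.List.pyRange_one_eq_nil]
  | succ k ih =>
    rw [show ((k + 1 : Nat) : Int) = (k : Int) + 1 by push_cast; ring,
      PySem.List.pyRange_one_succ_right (by positivity), List.foldl_append, ih (by omega)]
    simp only [List.foldl_cons, List.foldl_nil]
    have hc : PySem.Int.floordiv ((M.choose k : Int) * ((M : Int) - (k : Int))) ((k : Int) + 1) =
        (M.choose (k + 1) : Int) := by
      rw [show ((M : Int) - (k : Int)) = ((M - k : Nat) : Int) by omega,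
        show ((k : Int) + 1) = ((k + 1 : Nat) : Int) by push_cast; ring,
        ← Nat.cast_mul, ← Nat.choose_succ_right_eq, PySem.Int.floordiv_natCast,
        Nat.mul_div_cancel _ (by omega)]
    rw [hc]
    simp [List.range_succ]

theorem pvAlt (N : Nat) (h : 1 ≤ N) :
    second_derivate_alt (N : Int) =
      (List.range (N + 2)).map (fun (k : Nat) =>
        pvPad (pvBinRow (N - 1)) (k : Int) - 2 * pvPad (pvBinRow (N - 1)) ((k : Int) - 1) +
          pvPad (pvBinRow (N - 1)) ((k : Int) - 2)) := by
  rw [second_derivate_alt, if_neg (by omega)]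
  simp only []
  rw [show (N : Int) - 1 = ((N - 1 : Nat) : Int) by omega, pvBRow (N - 1) (N - 1) le_rfl]
  rw [show (N : Int) + 2 = ((N + 2 : Nat) : Int) by push_cast; ring,
    PySem.List.pyRange_zero_nat, List.map_map]
  simp only [Function.comp_def]
  rfl

-- ===== VERDICT (by name: the statement is the Claim_ definition above) =====
theorem second_derivate_spec : Claim_equal_second_derivate := by
  intro n _
  unfold Spec_second_derivate
  by_cases hn : n ≤ 0
  · rw [second_derivate, if_neg (by omega), second_derivate_alt, if_pos hn]
  · have hN : n = ((n.toNat : Nat) : Int) := by omega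
    set N := n.toNat with hNdef
    have h1 : 1 ≤ N := by omega
    rw [hN]
    have hfd : first_derivate (N : Int) =
        (List.range ((N - 1) + 1 + 1)).map (fun (k : Nat) =>
          pvPad (pvBinRow (N - 1)) (k : Int) - pvPad (pvBinRow (N - 1)) ((k : Int) - 1)) := by
      rw [first_derivate, if_pos (by exact_mod_cast (by omega : (0:Int) < (N : Int))), pvPascal N h1]
      have := pvDiffShape (pvBinRow (N - 1))
      rw [pvBinRow_length] at this
      exact this
    have hlenfd : (first_derivate (N : Int)).length = N + 1 := by
      rw [hfd]
      simp
      omega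
    have hsd : second_derivate ((N : Nat) : Int) =
        (List.range (N + 2)).map (fun (k : Nat) =>
          pvPad (first_derivate (N : Int)) (k : Int) -
            pvPad (first_derivate (N : Int)) ((k : Int) - 1)) := by
      rw [second_derivate, if_pos (by exact_mod_cast (by omega : (0:Int) < (N : Int))),
        pvDiffShape, hlenfd]
    have hF : first_derivate (N : Int) = (List.range ((pvBinRow (N - 1)).length + 1)).map
        (fun (k : Nat) => pvPad (pvBinRow (N - 1)) (k : Int) -
          pvPad (pvBinRow (N - 1)) ((k : Int) - 1)) := by
      rw [pvBinRow_length]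
      exact hfd
    rw [hsd, pvAlt N h1]
    apply List.map_congr_left
    intro k _
    rw [pvPad_diff _ _ hF, pvPad_diff _ _ hF,
      show ((k : Int) - 1 - 1) = (k : Int) - 2 by ring]
    ring
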